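-- pv_equiv track=rewrite | github.com/cirosantilli/project-euler-solvers | solvers/396.py | _f2_iter_mod2
-- ===== SOURCE A (Python) =====
-- MOD2 = 1 << 9  # 2^9 = 512
--
-- def _f2_exact(x: int) -> int:
--     """f(x) = H_{ω^2}(x) exactly (only used for tiny x)."""
--     e = x + 1
--     return (x + 1) * (1 << e) - 1
--
-- def _f2_iter_mod2(x0: int, iters: int) -> int:
--     """Compute f applied iters times to x0, modulo 2^9."""
--     mask = MOD2 - 1
--     x_mod = x0 & mask
--     exact_x = x0 if x0 <= 20 else None
--
--     for _ in range(iters):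
--         if exact_x is not None and (exact_x + 1) < 9:
--             p2 = 1 << (exact_x + 1)
--             exact_next = _f2_exact(exact_x)
--             exact_x = exact_next if exact_next <= 20 else None
--         else:
--             p2 = 0
--             exact_x = None
--         x_mod = (((x_mod + 1) & mask) * p2 - 1) & mask
--
--     return x_mod
-- ===== SOURCE B (Python) =====
-- def _f2_iter_mod2(x0: int, iters: int) -> int:
--     """Compute f applied iters times to x0, modulo 2^9.
--
--     Fast version: the exact value of the iterate is only usable for a
--     bounded transient (0 -> 1 -> 7 -> gone in at most 3 steps); as soon as
--     it is unknown or >= 8, one iteration multiplies by p2 = 0 and pins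
--     x_mod at 511 forever, so the remaining iterations need no work.
--     """
--     mask = (1 << 9) - 1
--     x_mod = x0 & mask
--     exact = x0 if x0 <= 20 else None
--     k = 0
--     while k < iters and exact is not None and exact < 8:
--         if exact == -1:
--             # fixed point: the step leaves both x_mod and exact unchanged
--             return x_mod
--         p2 = 1 << (exact + 1)
--         x_mod = (((x_mod + 1) & mask) * p2 - 1) & mask
--         nxt = (exact + 1) * p2 - 1
--         exact = nxt if nxt <= 20 else None
--         k += 1
--     if k < iters:
--         x_mod = 511
--     return x_mod
-- ===== Notes on version B (the rewrite author's own statement) =====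
-- stated objective: faster
-- what changed: A iterates the recurrence iters times; B only simulates the bounded exact transient (at most 3 steps for nonnegative x0, plus a fixed-point shortcut at -1) and returns the pinned value 511 for all remaining iterations, since once the exact value is gone the step multiplies by p2=0 and fixes x_mod at 511.
import Mathlib
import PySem

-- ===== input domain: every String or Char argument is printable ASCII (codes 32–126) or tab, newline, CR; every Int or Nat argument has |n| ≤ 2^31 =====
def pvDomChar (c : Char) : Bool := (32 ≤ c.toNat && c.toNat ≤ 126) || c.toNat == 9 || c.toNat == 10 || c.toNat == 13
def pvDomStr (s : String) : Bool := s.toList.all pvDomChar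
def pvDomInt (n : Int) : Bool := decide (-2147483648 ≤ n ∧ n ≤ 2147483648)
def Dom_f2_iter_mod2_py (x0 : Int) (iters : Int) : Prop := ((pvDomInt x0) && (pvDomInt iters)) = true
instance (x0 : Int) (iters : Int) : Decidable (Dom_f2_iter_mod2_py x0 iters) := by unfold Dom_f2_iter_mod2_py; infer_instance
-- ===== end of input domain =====

-- B replaces A's O(iters) loop by the bounded exact transient (which dies within 3 steps for
-- nonnegative x0, after which x_mod is pinned at 511), making it O(1); return value only.

-- ===== PORT A =====
-- one iteration of A's for-body over the state (x_mod, exact_x)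
def pvA_step (s : Int × Option Int) : Int × Option Int :=
  let mask : Int := 512 - 1        -- MOD2 - 1, MOD2 = 1 << 9
  let pe : Int × Option Int :=
    match s.2 with
    | some e =>
      if e + 1 < 9 then
        -- 1 << (e + 1): exact for e + 1 ≥ 0; Python raises on a negative shift (excluded by Pre_)
        ((1 : Int) <<< (e + 1).toNat,
         -- _f2_exact e = (e + 1) * (1 << (e + 1)) - 1
         if (e + 1) * (1 : Int) <<< (e + 1).toNat - 1 ≤ 20
         then some ((e + 1) * (1 : Int) <<< (e + 1).toNat - 1) else none)
      else (0, none)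
    | none => (0, none)
  (PySem.Int.band (PySem.Int.band (s.1 + 1) mask * pe.1 - 1) mask, pe.2)

def f2_iter_mod2_py (x0 : Int) (iters : Int) : Int :=
  let mask : Int := 512 - 1
  let init : Int × Option Int := (PySem.Int.band x0 mask, if x0 ≤ 20 then some x0 else none)
  ((PySem.List.pyRange 0 iters 1).foldl (fun s _ => pvA_step s) init).1

-- ===== PORT B =====
-- B's while loop: fuel = iters - k; exits early with 511 once the exact value is gone,
-- and returns x_mod directly at the fixed point exact = -1
def pvB_loop : Nat → Int → Option Int → Int
  | 0, x_mod, _ => x_mod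
  | Nat.succ n, x_mod, exact =>
    match exact with
    | some e =>
      if e < 8 then
        if e = -1 then x_mod
        else
          let p2 : Int := (1 : Int) <<< (e + 1).toNat    -- 1 << (e + 1), e ≥ 0 here
          let x' := PySem.Int.band (PySem.Int.band (x_mod + 1) 511 * p2 - 1) 511
          let nxt := (e + 1) * p2 - 1
          pvB_loop n x' (if nxt ≤ 20 then some nxt else none)
      else 511
    | none => 511

def f2_iter_mod2_py_alt (x0 : Int) (iters : Int) : Int :=
  pvB_loop iters.toNat (PySem.Int.band x0 511) (if x0 ≤ 20 then some x0 else none)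

-- ===== PRECONDITION & SPEC =====
-- Pre_ excludes exactly the inputs where A raises: x0 ≤ -2 with iters ≥ 1 hits '1 << (x0 + 1)'
-- with a negative shift count (ValueError). A returns on everything Pre_ admits.
def Pre_f2_iter_mod2_py (x0 : Int) (iters : Int) : Prop := -1 ≤ x0 ∨ iters ≤ 0
instance (x0 : Int) (iters : Int) : Decidable (Pre_f2_iter_mod2_py x0 iters) := by unfold Pre_f2_iter_mod2_py; infer_instance
def pvWitness_f2_iter_mod2_py : Int × Int := (3, 5)

def Spec_f2_iter_mod2_py (x0 : Int) (iters : Int) (out : Int) : Prop := out = f2_iter_mod2_py_alt x0 iters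
instance (x0 : Int) (iters : Int) (out : Int) : Decidable (Spec_f2_iter_mod2_py x0 iters out) := by unfold Spec_f2_iter_mod2_py; infer_instance

-- ===== CLAIM (what is proved, stated in full; the proofs are below) =====
def Claim_equal_f2_iter_mod2_py : Prop := ∀ (x0 : Int) (iters : Int), Dom_f2_iter_mod2_py x0 iters → Pre_f2_iter_mod2_py x0 iters → Spec_f2_iter_mod2_py x0 iters (f2_iter_mod2_py x0 iters)

-- ===== LEMMAS AND PROOFS =====

-- A's fold ignores the list elements: it is iteration of pvA_step, length many times
def pvAIter : Nat → Int × Option Int → Int × Option Int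
  | 0, s => s
  | Nat.succ n, s => pvAIter n (pvA_step s)

theorem pvFoldl_eq_iter (l : List Int) (s : Int × Option Int) :
    l.foldl (fun s _ => pvA_step s) s = pvAIter l.length s := by
  induction l generalizing s with
  | nil => rfl
  | cons a t ih => simpa [pvAIter] using ih (pvA_step s)

theorem pvBand_neg_one : PySem.Int.band (-1) 511 = 511 := by decide

theorem pvA_step_none (m : Int) : pvA_step (m, none) = (511, none) := by
  simp [pvA_step, pvBand_neg_one]

theorem pvAIter_none (n : Nat) : (pvAIter n (511, none)).1 = 511 := by
  induction n with
  | zero => rfl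
  | succ k ih => simpa [pvAIter, pvA_step_none] using ih

-- the exact-chain fixed point at x0 = -1 (A's step leaves the state unchanged there)
theorem pvA_step_neg1 : pvA_step (511, some (-1)) = (511, some (-1)) := by decide

theorem pvAIter_neg1 (n : Nat) : (pvAIter n (511, some (-1))).1 = 511 := by
  induction n with
  | zero => rfl
  | succ k ih => simpa [pvAIter, pvA_step_neg1] using ih

theorem pvB_loop_neg1 (n : Nat) (m : Int) : pvB_loop n m (some (-1)) = m := by
  cases n <;> simp [pvB_loop]

-- simulation: while the exact value (if any) is nonnegative, A's full iteration equals B's loop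
theorem pvSim (n : Nat) (m : Int) (opt : Option Int)
    (h : ∀ e, opt = some e → 0 ≤ e) :
    (pvAIter n (m, opt)).1 = pvB_loop n m opt := by
  induction n generalizing m opt with
  | zero => rfl
  | succ k ih =>
    cases opt with
    | none =>
      show (pvAIter k (pvA_step (m, none))).1 = 511
      rw [pvA_step_none]; exact pvAIter_none k
    | some e =>
      have he : 0 ≤ e := h e rfl
      by_cases h8 : e < 8
      · have h9 : e + 1 < 9 := by omega
        have hne : ¬ (e = -1) := by omega
        have hstep : pvA_step (m, some e) =
            (PySem.Int.band (PySem.Int.band (m + 1) 511 * ((1 : Int) <<< (e + 1).toNat) - 1) 511,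
             if (e + 1) * (1 : Int) <<< (e + 1).toNat - 1 ≤ 20
             then some ((e + 1) * (1 : Int) <<< (e + 1).toNat - 1) else none) := by
          simp [pvA_step, h9]
        have hinv : ∀ e', (if (e + 1) * (1 : Int) <<< (e + 1).toNat - 1 ≤ 20
              then some ((e + 1) * (1 : Int) <<< (e + 1).toNat - 1) else (none : Option Int)) = some e' → 0 ≤ e' := by
          intro e' he'
          have hsh : (1 : Int) <<< (e + 1).toNat = 2 ^ (e + 1).toNat := by
            rw [Int.shiftLeft_eq]; ring
          have hp : (2 : Int) ≤ (1 : Int) <<< (e + 1).toNat := by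
            rw [hsh]
            calc (2 : Int) = 2 ^ 1 := by norm_num
            _ ≤ 2 ^ (e + 1).toNat := by
              apply pow_le_pow_right₀ (by norm_num)
              omega
          have h1 : (2 : Int) ≤ (e + 1) * ((1 : Int) <<< (e + 1).toNat) := by nlinarith
          split at he'
          · cases he'; omega
          · cases he'
        show (pvAIter k (pvA_step (m, some e))).1 = pvB_loop (k + 1) m (some e)
        rw [hstep]
        simp only [pvB_loop, if_pos h8, if_neg hne]
        exact ih _ _ hinv
      · have h9 : ¬ (e + 1 < 9) := by omega
        have hne : ¬ (e = -1) := by omega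
        have hstep : pvA_step (m, some e) = (511, none) := by
          simp [pvA_step, h9, pvBand_neg_one]
        show (pvAIter k (pvA_step (m, some e))).1 = pvB_loop (k + 1) m (some e)
        rw [hstep]
        simp only [pvB_loop]
        rw [if_neg h8]
        exact pvAIter_none k

-- ===== VERDICT (by name: the statement is the Claim_ definition above) =====
theorem f2_iter_mod2_py_spec : Claim_equal_f2_iter_mod2_py := by
  intro x0 iters _ hPre
  unfold Spec_f2_iter_mod2_py f2_iter_mod2_py f2_iter_mod2_py_alt
  simp only []
  rw [pvFoldl_eq_iter, PySem.List.length_pyRange_one]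
  have hlen : ((iters - 0).toNat) = iters.toNat := by omega
  rw [hlen]
  rcases le_or_gt 0 x0 with hx | hx
  · -- x0 ≥ 0: simulate step for step
    apply pvSim
    intro e he
    split at he
    · cases he; omega
    · cases he
  · rcases hPre with hx1 | hit
    · -- x0 = -1: A sits at the fixed point (511, some (-1)); B returns x_mod = 511 immediately
      have hx0 : x0 = -1 := by omega
      subst hx0
      have hm : PySem.Int.band (-1 : Int) (512 - 1) = 511 := by decide
      have hA : (if (-1 : Int) ≤ 20 then some (-1 : Int) else none) = some (-1) := by norm_num
      rw [hm, hA, pvAIter_neg1, pvB_loop_neg1]; decide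
    · -- iters ≤ 0: zero iterations on both sides
      have h0 : iters.toNat = 0 := by omega
      rw [h0]
      rfl
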